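-- pv_equiv track=rewrite | github.com/massimocristi1970/file-convertor | data_io.py | _python_date_format_to_excel
-- ===== SOURCE A (Python) =====
-- def _python_date_format_to_excel(date_format: str) -> str:
--     mapping = {
--         "%Y": "yyyy",
--         "%y": "yy",
--         "%m": "mm",
--         "%d": "dd",
--     }
--     excel_format = str(date_format or "%Y-%m-%d")
--     for token, replacement in mapping.items():
--         excel_format = excel_format.replace(token, replacement)
--     return excel_format
-- ===== SOURCE B (Python) =====
-- def _python_date_format_to_excel(date_format: str) -> str:
--     mapping = {
--         "%Y": "yyyy",
--         "%y": "yy",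
--         "%m": "mm",
--         "%d": "dd",
--     }
--     s = str(date_format or "%Y-%m-%d")
--     parts = []
--     i = 0
--     n = len(s)
--     while i < n:
--         two = s[i:i + 2]
--         if two in mapping:
--             parts.append(mapping[two])
--             i += 2
--         else:
--             parts.append(s[i])
--             i += 1
--     return "".join(parts)
-- ===== Notes on version B (the rewrite author's own statement) =====
-- stated objective: alternative
-- what changed: Replaces A's four sequential whole-string str.replace passes with one left-to-right scan that classifies s[i:i+2] against the token mapping and advances 1 or 2, joining the emitted pieces.
-- intended difference: On inputs containing "%%Y", A's sequential passes cascade (the %Y replacement creates a fresh %y that the next pass consumes, e.g. "%%Y" -> "yyyyy", swallowing the literal '%'), while B returns "%yyyy", the intended left-to-right token conversion. — e.g. on _python_date_format_to_excel("%%Y"): A returns "yyyyy", B returns "%yyyy"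
import Mathlib
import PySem

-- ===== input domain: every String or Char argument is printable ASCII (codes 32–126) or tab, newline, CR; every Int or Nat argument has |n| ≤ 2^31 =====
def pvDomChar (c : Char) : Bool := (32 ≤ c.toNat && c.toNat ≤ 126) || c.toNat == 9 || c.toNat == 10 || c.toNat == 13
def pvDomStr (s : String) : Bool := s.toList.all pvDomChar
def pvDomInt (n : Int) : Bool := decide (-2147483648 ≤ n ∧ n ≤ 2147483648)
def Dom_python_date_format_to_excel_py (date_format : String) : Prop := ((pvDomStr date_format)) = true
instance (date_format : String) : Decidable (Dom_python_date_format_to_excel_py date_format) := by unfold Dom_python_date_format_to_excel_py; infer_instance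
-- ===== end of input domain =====

set_option maxRecDepth 8192


-- B replaces A's four sequential str.replace passes with one left-to-right token scan (objective: alternative);
-- on strings containing "%%Y" the cascade of A's passes differs from the scan — see D_ below.

-- ===== PORT A =====
def python_date_format_to_excel_py (date_format : String) : String :=
  -- excel_format = str(date_format or "%Y-%m-%d")
  let excel0 : String := if date_format = "" then "%Y-%m-%d" else date_format
  -- the dict iterates in insertion order: %Y, %y, %m, %d
  let e1 := PySem.Str.replace excel0 "%Y" "yyyy"
  let e2 := PySem.Str.replace e1 "%y" "yy"
  let e3 := PySem.Str.replace e2 "%m" "mm"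
  PySem.Str.replace e3 "%d" "dd"

-- ===== PORT B =====
-- the while-loop of Source B: examine s[i:i+2]; on a token emit its replacement and advance 2, else emit s[i] and advance 1
def pvScanB : List Char → List Char
  | [] => []
  | [c] => [c]
  | c :: d :: r =>
    if c = '%' ∧ d = 'Y' then 'y' :: 'y' :: 'y' :: 'y' :: pvScanB r
    else if c = '%' ∧ d = 'y' then 'y' :: 'y' :: pvScanB r
    else if c = '%' ∧ d = 'm' then 'm' :: 'm' :: pvScanB r
    else if c = '%' ∧ d = 'd' then 'd' :: 'd' :: pvScanB r
    else c :: pvScanB (d :: r)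

def python_date_format_to_excel_py_alt (date_format : String) : String :=
  let s : String := if date_format = "" then "%Y-%m-%d" else date_format
  String.ofList (pvScanB s.toList)

-- ===== PRECONDITION & SPEC =====
-- On inputs containing "%%Y", A's sequential passes cascade ("%%Y" → "%yyyy" → "yyyyy", the literal '%' is
-- swallowed), while B's single scan returns "%yyyy", the intended left-to-right token conversion.
def D_python_date_format_to_excel_py (date_format : String) : Prop :=
  PySem.Str.isIn "%%Y" date_format = true
instance (date_format : String) : Decidable (D_python_date_format_to_excel_py date_format) := by
  unfold D_python_date_format_to_excel_py; infer_instance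

def Spec_python_date_format_to_excel_py (date_format : String) (out : String) : Prop :=
  ¬ D_python_date_format_to_excel_py date_format → out = python_date_format_to_excel_py_alt date_format
instance (date_format : String) (out : String) : Decidable (Spec_python_date_format_to_excel_py date_format out) := by
  unfold Spec_python_date_format_to_excel_py; infer_instance

def pvDiffWitness_python_date_format_to_excel_py : String := "%%Y"
def pvDiffWitnessOut_python_date_format_to_excel_py : String × String := ("yyyyy", "%yyyy")

-- ===== CLAIM (what is proved, stated in full; the proofs are below) =====
def Claim_unchanged_python_date_format_to_excel_py : Prop := ∀ (date_format : String), Dom_python_date_format_to_excel_py date_format → Spec_python_date_format_to_excel_py date_format (python_date_format_to_excel_py date_format)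
def Claim_changed_python_date_format_to_excel_py : Prop := Dom_python_date_format_to_excel_py (pvDiffWitness_python_date_format_to_excel_py) ∧ D_python_date_format_to_excel_py (pvDiffWitness_python_date_format_to_excel_py) ∧ python_date_format_to_excel_py (pvDiffWitness_python_date_format_to_excel_py) = pvDiffWitnessOut_python_date_format_to_excel_py.1 ∧ python_date_format_to_excel_py_alt (pvDiffWitness_python_date_format_to_excel_py) = pvDiffWitnessOut_python_date_format_to_excel_py.2 ∧ pvDiffWitnessOut_python_date_format_to_excel_py.1 ≠ pvDiffWitnessOut_python_date_format_to_excel_py.2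
def Claim_exact_python_date_format_to_excel_py : Prop := ∀ (date_format : String), Dom_python_date_format_to_excel_py date_format → D_python_date_format_to_excel_py date_format → python_date_format_to_excel_py date_format ≠ python_date_format_to_excel_py_alt date_format

-- ===== LEMMAS AND PROOFS =====

-- a fuel-free reformulation of PySem.Chars.replace (for old ≠ [])
def pvRep (old new : List Char) : List Char → List Char
  | [] => []
  | c :: t =>
    if old.isPrefixOf (c :: t) ∧ old ≠ [] then new ++ pvRep old new (t.drop (old.length - 1))
    else c :: pvRep old new t
termination_by l => l.length
decreasing_by
all_goals simp only [List.length_cons, List.length_drop]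
all_goals omega

theorem pv_go_eq (old new : List Char) (h : old ≠ []) :
    ∀ fuel (l acc : List Char), l.length ≤ fuel →
      PySem.Chars.replace.go old new fuel l acc = acc.reverse ++ pvRep old new l := by
  intro fuel
  induction fuel with
  | zero =>
    intro l acc hl
    have : l = [] := by cases l <;> simp_all
    subst this
    simp [PySem.Chars.replace.go, pvRep]
  | succ n ih =>
    intro l acc hl
    cases l with
    | nil => simp [PySem.Chars.replace.go, pvRep]
    | cons c t =>
      rw [PySem.Chars.replace.go]
      by_cases hp : old.isPrefixOf (c :: t) = true
      · have h1 : 1 ≤ old.length := by cases old <;> simp_all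
        have hlen : ((c :: t).drop old.length).length ≤ n := by
          simp only [List.length_drop, List.length_cons]
          simp only [List.length_cons] at hl; omega
        rw [if_pos hp, ih _ _ hlen]
        rw [pvRep, if_pos ⟨hp, h⟩]
        have hd : (c :: t).drop old.length = t.drop (old.length - 1) := by
          cases old with
          | nil => exact absurd rfl h
          | cons o os => simp
        rw [hd]; simp
      · rw [if_neg hp, ih _ _ (by simp at hl ⊢; omega)]
        rw [pvRep, if_neg (by tauto)]
        simp

theorem pv_replace_eq (s old new : List Char) (h : old ≠ []) :
    PySem.Chars.replace s old new = pvRep old new s := by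
  rw [PySem.Chars.replace, if_neg (by simpa using h)]
  simpa using pv_go_eq old new h s.length s [] le_rfl

theorem pvRep_nil (old new : List Char) : pvRep old new [] = [] := by rw [pvRep]

theorem pvRep_single (p q : Char) (new : List Char) (c : Char) :
    pvRep [p, q] new [c] = [c] := by
  rw [pvRep, if_neg (by simp [List.isPrefixOf])]
  rw [pvRep_nil]

theorem pvRep_pos (p q : Char) (new t : List Char) :
    pvRep [p, q] new (p :: q :: t) = new ++ pvRep [p, q] new t := by
  rw [pvRep, if_pos (by simp [List.isPrefixOf])]
  simp

theorem pvRep_neg₁ (p q c : Char) (new t : List Char) (h : c ≠ p) :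
    pvRep [p, q] new (c :: t) = c :: pvRep [p, q] new t := by
  rw [pvRep, if_neg]
  simp only [List.isPrefixOf, Bool.and_eq_true, beq_iff_eq, not_and]
  intro hc
  exact absurd (by simpa using hc.1.symm) h

theorem pvRep_neg_head (p q : Char) (new X : List Char) (h : X.head? ≠ some q) :
    pvRep [p, q] new (p :: X) = p :: pvRep [p, q] new X := by
  cases X with
  | nil => rw [pvRep_nil, pvRep_single]
  | cons e t =>
    rw [pvRep, if_neg]
    simp only [List.isPrefixOf, Bool.and_eq_true, beq_iff_eq, not_and]
    intro hc
    have : e = q := by have h' : q = e := by simpa using hc.2.1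
                       exact h'.symm
    exact absurd (by simp [this]) h

theorem pvRep_head (p q n : Char) (ns l : List Char) :
    (pvRep [p, q] (n :: ns) l).head? =
      if [p, q].isPrefixOf l = true then some n else l.head? := by
  cases l with
  | nil => simp [pvRep_nil, List.isPrefixOf]
  | cons c t =>
    rw [pvRep]
    by_cases hp : [p, q].isPrefixOf (c :: t) = true
    · rw [if_pos ⟨hp, by simp⟩, if_pos hp]; simp
    · rw [if_neg (by tauto), if_neg hp]; simp

theorem pvRep_append (p q : Char) (new pre s : List Char) (h : ∀ c ∈ pre, c ≠ p) :
    pvRep [p, q] new (pre ++ s) = pre ++ pvRep [p, q] new s := by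
  induction pre with
  | nil => simp
  | cons c pre' ih =>
    have hc : c ≠ p := h c (by simp)
    rw [List.cons_append, pvRep_neg₁ p q c new _ hc, ih (fun x hx => h x (by simp [hx]))]
    simp

-- the composite of A's four passes, on char lists
def pvComp (l : List Char) : List Char :=
  pvRep ['%', 'd'] ['d', 'd'] (pvRep ['%', 'm'] ['m', 'm']
    (pvRep ['%', 'y'] ['y', 'y'] (pvRep ['%', 'Y'] ['y', 'y', 'y', 'y'] l)))

-- the heart of the file: outside "%%Y" the four passes equal the scan; inside, the outputs
-- contain strictly fewer '%' on A's side, hence always differ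
theorem pvMain : ∀ (n : Nat) (l : List Char), l.length ≤ n →
    ((¬ (['%', '%', 'Y'] <:+: l)) → pvComp l = pvScanB l) ∧
    ((pvComp l).count '%' ≤ (pvScanB l).count '%') ∧
    ((['%', '%', 'Y'] <:+: l) → (pvComp l).count '%' < (pvScanB l).count '%') := by
  intro n
  induction n with
  | zero =>
    intro l hl
    have : l = [] := by cases l <;> simp_all
    subst this
    refine ⟨fun _ => ?_, ?_, fun h => absurd h.length_le (by simp)⟩
    · simp [pvComp, pvRep_nil, pvScanB]
    · simp [pvComp, pvRep_nil, pvScanB]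
  | succ n ih =>
    intro l hl
    match l with
    | [] =>
      refine ⟨fun _ => ?_, ?_, fun h => absurd h.length_le (by simp)⟩
      · simp [pvComp, pvRep_nil, pvScanB]
      · simp [pvComp, pvRep_nil, pvScanB]
    | [c] =>
      have e1 : pvComp [c] = [c] := by
        simp [pvComp, pvRep_single]
      have e2 : pvScanB [c] = [c] := by rw [pvScanB]
      refine ⟨fun _ => by rw [e1, e2], by rw [e1, e2], fun h => absurd h.length_le (by simp)⟩
    | c :: d :: r =>
      have hr : r.length ≤ n := by simp at hl; omega
      have hdr : (d :: r).length ≤ n := by simp at hl ⊢; omega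
      by_cases hY : c = '%' ∧ d = 'Y'
      · obtain ⟨rfl, rfl⟩ := hY
        have e1 : pvComp ('%' :: 'Y' :: r) = 'y' :: 'y' :: 'y' :: 'y' :: pvComp r := by
          unfold pvComp
          rw [pvRep_pos,
              pvRep_append '%' 'y' _ ['y','y','y','y'] _ (by simp),
              pvRep_append '%' 'm' _ ['y','y','y','y'] _ (by simp),
              pvRep_append '%' 'd' _ ['y','y','y','y'] _ (by simp)]
          rfl
        have e2 : pvScanB ('%' :: 'Y' :: r) = 'y' :: 'y' :: 'y' :: 'y' :: pvScanB r := by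
          rw [pvScanB]; simp
        have hinf : (['%', '%', 'Y'] <:+: ('%' :: 'Y' :: r)) → ['%', '%', 'Y'] <:+: r := by
          intro H
          rcases List.infix_cons_iff.mp H with hp | hi
          · simp [List.cons_prefix_cons] at hp
          rcases List.infix_cons_iff.mp hi with hp | hi
          · simp [List.cons_prefix_cons] at hp
          exact hi
        refine ⟨fun H => ?_, ?_, fun H => ?_⟩
        · rw [e1, e2, (ih r hr).1 (fun h => H (List.infix_cons (List.infix_cons h)))]
        · rw [e1, e2]; simpa using (ih r hr).2.1
        · rw [e1, e2]; simpa using (ih r hr).2.2 (hinf H)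
      · by_cases hy : c = '%' ∧ d = 'y'
        · obtain ⟨rfl, rfl⟩ := hy
          have e1 : pvComp ('%' :: 'y' :: r) = 'y' :: 'y' :: pvComp r := by
            unfold pvComp
            rw [pvRep_neg_head '%' 'Y' _ _ (by simp), pvRep_neg₁ '%' 'Y' 'y' _ _ (by simp),
                pvRep_pos,
                pvRep_append '%' 'm' _ ['y','y'] _ (by simp),
                pvRep_append '%' 'd' _ ['y','y'] _ (by simp)]
            rfl
          have e2 : pvScanB ('%' :: 'y' :: r) = 'y' :: 'y' :: pvScanB r := by
            rw [pvScanB]; simp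
          have hinf : (['%', '%', 'Y'] <:+: ('%' :: 'y' :: r)) → ['%', '%', 'Y'] <:+: r := by
            intro H
            rcases List.infix_cons_iff.mp H with hp | hi
            · simp [List.cons_prefix_cons] at hp
            rcases List.infix_cons_iff.mp hi with hp | hi
            · simp [List.cons_prefix_cons] at hp
            exact hi
          refine ⟨fun H => ?_, ?_, fun H => ?_⟩
          · rw [e1, e2, (ih r hr).1 (fun h => H (List.infix_cons (List.infix_cons h)))]
          · rw [e1, e2]; simpa using (ih r hr).2.1
          · rw [e1, e2]; simpa using (ih r hr).2.2 (hinf H)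
        · by_cases hm : c = '%' ∧ d = 'm'
          · obtain ⟨rfl, rfl⟩ := hm
            have e1 : pvComp ('%' :: 'm' :: r) = 'm' :: 'm' :: pvComp r := by
              unfold pvComp
              rw [pvRep_neg_head '%' 'Y' _ _ (by simp), pvRep_neg₁ '%' 'Y' 'm' _ _ (by simp),
                  pvRep_neg_head '%' 'y' _ _ (by simp), pvRep_neg₁ '%' 'y' 'm' _ _ (by simp),
                  pvRep_pos,
                  pvRep_append '%' 'd' _ ['m','m'] _ (by simp)]
              rfl
            have e2 : pvScanB ('%' :: 'm' :: r) = 'm' :: 'm' :: pvScanB r := by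
              rw [pvScanB]; simp
            have hinf : (['%', '%', 'Y'] <:+: ('%' :: 'm' :: r)) → ['%', '%', 'Y'] <:+: r := by
              intro H
              rcases List.infix_cons_iff.mp H with hp | hi
              · simp [List.cons_prefix_cons] at hp
              rcases List.infix_cons_iff.mp hi with hp | hi
              · simp [List.cons_prefix_cons] at hp
              exact hi
            refine ⟨fun H => ?_, ?_, fun H => ?_⟩
            · rw [e1, e2, (ih r hr).1 (fun h => H (List.infix_cons (List.infix_cons h)))]
            · rw [e1, e2]; simpa using (ih r hr).2.1
            · rw [e1, e2]; simpa using (ih r hr).2.2 (hinf H)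
          · by_cases hd : c = '%' ∧ d = 'd'
            · obtain ⟨rfl, rfl⟩ := hd
              have e1 : pvComp ('%' :: 'd' :: r) = 'd' :: 'd' :: pvComp r := by
                unfold pvComp
                rw [pvRep_neg_head '%' 'Y' _ _ (by simp), pvRep_neg₁ '%' 'Y' 'd' _ _ (by simp),
                    pvRep_neg_head '%' 'y' _ _ (by simp), pvRep_neg₁ '%' 'y' 'd' _ _ (by simp),
                    pvRep_neg_head '%' 'm' _ _ (by simp), pvRep_neg₁ '%' 'm' 'd' _ _ (by simp),
                    pvRep_pos]
                rfl
              have e2 : pvScanB ('%' :: 'd' :: r) = 'd' :: 'd' :: pvScanB r := by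
                rw [pvScanB]; simp
              have hinf : (['%', '%', 'Y'] <:+: ('%' :: 'd' :: r)) → ['%', '%', 'Y'] <:+: r := by
                intro H
                rcases List.infix_cons_iff.mp H with hp | hi
                · simp [List.cons_prefix_cons] at hp
                rcases List.infix_cons_iff.mp hi with hp | hi
                · simp [List.cons_prefix_cons] at hp
                exact hi
              refine ⟨fun H => ?_, ?_, fun H => ?_⟩
              · rw [e1, e2, (ih r hr).1 (fun h => H (List.infix_cons (List.infix_cons h)))]
              · rw [e1, e2]; simpa using (ih r hr).2.1
              · rw [e1, e2]; simpa using (ih r hr).2.2 (hinf H)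
            · by_cases h5 : c = '%' ∧ d = '%' ∧ r.head? = some 'Y'
              · -- the cascade case: l starts with "%%Y"
                obtain ⟨rfl, rfl, hr5⟩ := h5
                cases r with
                | nil => simp at hr5
                | cons e r₂ =>
                  have he : e = 'Y' := by simpa using hr5
                  subst he
                  have hr₂ : r₂.length ≤ n := by simp at hl; omega
                  have e1 : pvComp ('%' :: '%' :: 'Y' :: r₂) =
                      'y' :: 'y' :: 'y' :: 'y' :: 'y' :: pvComp r₂ := by
                    unfold pvComp
                    rw [pvRep_neg_head '%' 'Y' _ _ (by simp), pvRep_pos]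
                    generalize pvRep ['%', 'Y'] ['y', 'y', 'y', 'y'] r₂ = X
                    rw [show ('%' :: (['y', 'y', 'y', 'y'] ++ X)) = '%' :: 'y' :: 'y' :: 'y' :: 'y' :: X from rfl,
                        pvRep_pos,
                        show ('y' :: 'y' :: 'y' :: X) = ['y', 'y', 'y'] ++ X from rfl,
                        pvRep_append '%' 'y' _ ['y', 'y', 'y'] _ (by simp),
                        show (['y', 'y'] ++ (['y', 'y', 'y'] ++ pvRep ['%', 'y'] ['y', 'y'] X)) =
                          ['y', 'y', 'y', 'y', 'y'] ++ pvRep ['%', 'y'] ['y', 'y'] X from rfl,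
                        pvRep_append '%' 'm' _ ['y', 'y', 'y', 'y', 'y'] _ (by simp),
                        pvRep_append '%' 'd' _ ['y', 'y', 'y', 'y', 'y'] _ (by simp)]
                    rfl
                  have e2 : pvScanB ('%' :: '%' :: 'Y' :: r₂) =
                      '%' :: 'y' :: 'y' :: 'y' :: 'y' :: pvScanB r₂ := by
                    rw [pvScanB, if_neg (by decide), if_neg (by decide), if_neg (by decide),
                        if_neg (by decide), pvScanB]
                    simp
                  have hle : (pvComp r₂).count '%' ≤ (pvScanB r₂).count '%' := (ih r₂ hr₂).2.1
                  refine ⟨fun H => ?_, ?_, fun _ => ?_⟩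
                  · exact absurd (List.IsPrefix.isInfix ⟨r₂, rfl⟩) H
                  · rw [e1, e2]; simp; omega
                  · rw [e1, e2]; simp; omega
              · -- the peel case: no token and no "%%Y" at the head
                have e2 : pvScanB (c :: d :: r) = c :: pvScanB (d :: r) := by
                  rw [pvScanB, if_neg hY, if_neg hy, if_neg hm, if_neg hd]
                have e1 : pvComp (c :: d :: r) = c :: pvComp (d :: r) := by
                  by_cases hc : c = '%'
                  · subst hc
                    have hdY : d ≠ 'Y' := fun h => hY ⟨rfl, h⟩
                    have hdy : d ≠ 'y' := fun h => hy ⟨rfl, h⟩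
                    have hdm : d ≠ 'm' := fun h => hm ⟨rfl, h⟩
                    have hdd : d ≠ 'd' := fun h => hd ⟨rfl, h⟩
                    have hpre : ¬ (['%', 'Y'].isPrefixOf (d :: r) = true) := by
                      by_cases hdp : d = '%'
                      · subst hdp
                        intro hp
                        simp only [List.isPrefixOf, Bool.and_eq_true, beq_iff_eq] at hp
                        cases r with
                        | nil => simp [List.isPrefixOf] at hp
                        | cons e r' =>
                          simp only [List.isPrefixOf, Bool.and_eq_true, beq_iff_eq] at hp
                          exact h5 ⟨rfl, rfl, by simp [hp.2.1.symm]⟩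
                      · simp [List.isPrefixOf]; intro h; exact absurd h.symm hdp
                    have hh1 : (pvRep ['%', 'Y'] ['y','y','y','y'] (d :: r)).head? = some d := by
                      rw [pvRep_head, if_neg hpre]; rfl
                    have hh2 : (pvRep ['%', 'y'] ['y','y']
                        (pvRep ['%', 'Y'] ['y','y','y','y'] (d :: r))).head? ≠ some 'm' := by
                      rw [pvRep_head]
                      split
                      · simp
                      · rw [hh1]; simp [hdm]
                    have hh2d : (pvRep ['%', 'y'] ['y','y']
                        (pvRep ['%', 'Y'] ['y','y','y','y'] (d :: r))).head? ≠ some 'd' := by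
                      rw [pvRep_head]
                      split
                      · simp
                      · rw [hh1]; simp [hdd]
                    have hh3 : (pvRep ['%', 'm'] ['m','m'] (pvRep ['%', 'y'] ['y','y']
                        (pvRep ['%', 'Y'] ['y','y','y','y'] (d :: r)))).head? ≠ some 'd' := by
                      rw [pvRep_head]
                      split
                      · simp
                      · exact hh2d
                    unfold pvComp
                    rw [pvRep_neg_head '%' 'Y' _ _ (by simp [hdY]),
                        pvRep_neg_head '%' 'y' _ _ (by rw [hh1]; simp [hdy]),
                        pvRep_neg_head '%' 'm' _ _ hh2,
                        pvRep_neg_head '%' 'd' _ _ hh3]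
                  · unfold pvComp
                    rw [pvRep_neg₁ '%' 'Y' c _ _ hc, pvRep_neg₁ '%' 'y' c _ _ hc,
                        pvRep_neg₁ '%' 'm' c _ _ hc, pvRep_neg₁ '%' 'd' c _ _ hc]
                have hnp : ¬ (['%', '%', 'Y'] <+: (c :: d :: r)) := by
                  intro hp
                  rw [List.cons_prefix_cons] at hp
                  obtain ⟨hc1, hp⟩ := hp
                  rw [List.cons_prefix_cons] at hp
                  obtain ⟨hc2, hp⟩ := hp
                  cases r with
                  | nil => simp at hp
                  | cons e r' =>
                    rw [List.cons_prefix_cons] at hp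
                    exact h5 ⟨hc1.symm, hc2.symm, by simp [hp.1.symm]⟩
                refine ⟨fun H => ?_, ?_, fun H => ?_⟩
                · rw [e1, e2, (ih (d :: r) hdr).1 (fun h => H (List.infix_cons h))]
                · rw [e1, e2]
                  simp only [List.count_cons]
                  exact Nat.add_le_add_right (ih (d :: r) hdr).2.1 _
                · rcases List.infix_cons_iff.mp H with hp | hi
                  · exact absurd hp hnp
                  · rw [e1, e2]
                    simp only [List.count_cons]
                    exact Nat.add_lt_add_right ((ih (d :: r) hdr).2.2 hi) _

-- lifting the list-level facts to the String ports
theorem pvPortA_eq (s : String) :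
    python_date_format_to_excel_py s =
      String.ofList (pvComp (if s = "" then ("%Y-%m-%d" : String) else s).toList) := by
  unfold python_date_format_to_excel_py pvComp
  simp only [PySem.Str.replace, String.toList_ofList]
  rw [pv_replace_eq _ _ _ (by decide), pv_replace_eq _ _ _ (by simp),
      pv_replace_eq _ _ _ (by decide), pv_replace_eq _ _ _ (by simp)]
  rfl

theorem pvNotInfix (s : String) (hD : ¬ D_python_date_format_to_excel_py s) :
    ¬ (['%', '%', 'Y'] <:+: (if s = "" then ("%Y-%m-%d" : String) else s).toList) := by
  by_cases hs : s = ""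
  · subst hs; decide
  · rw [if_neg hs]
    intro h
    exact hD ((PySem.Str.isIn_iff_infix _ _).mpr (by exact h))

-- ===== VERDICT (by name: the statement is the Claim_ definition above) =====
theorem python_date_format_to_excel_py_spec : Claim_unchanged_python_date_format_to_excel_py := by
  intro s _
  unfold Spec_python_date_format_to_excel_py
  intro hD
  rw [pvPortA_eq]
  unfold python_date_format_to_excel_py_alt
  rw [(pvMain _ _ le_rfl).1 (pvNotInfix s hD)]

theorem python_date_format_to_excel_py_changed : Claim_changed_python_date_format_to_excel_py := by
  unfold Claim_changed_python_date_format_to_excel_py; decide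

theorem python_date_format_to_excel_py_tight : Claim_exact_python_date_format_to_excel_py := by
  intro s _ hD hEq
  have hs : s ≠ "" := by
    intro h; subst h
    exact absurd hD (by decide)
  have hinf : ['%', '%', 'Y'] <:+: (if s = "" then ("%Y-%m-%d" : String) else s).toList := by
    rw [if_neg hs]
    have := (PySem.Str.isIn_iff_infix _ _).mp hD
    simpa using this
  have hlt := (pvMain _ _ le_rfl).2.2 hinf
  rw [pvPortA_eq] at hEq
  unfold python_date_format_to_excel_py_alt at hEq
  have : pvComp (if s = "" then ("%Y-%m-%d" : String) else s).toList =
      pvScanB (if s = "" then ("%Y-%m-%d" : String) else s).toList := by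
    have := congrArg String.toList hEq
    simpa using this
  rw [this] at hlt
  omega
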